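-- pv_equiv track=rewrite | github.com/Sambhav0707/DSA_07 | 3803-count-residue-prefixes/3803-count-residue-prefixes.py | residuePrefixes
-- ===== SOURCE A (Python) =====
-- def residuePrefixes(s: str) -> int:
--     st = set()
--
--     count = 0
--
--     for i in range(len(s)):
--         st.add(s[i])
--
--         if len(st) == (i + 1) % 3:
--             count += 1
--
--     return count
-- ===== SOURCE B (Python) =====
-- def residuePrefixes(s: str) -> int:
--     return sum(1 for i in range(len(s)) if len(set(s[:i+1])) == (i + 1) % 3)
-- ===== Notes on version B (the rewrite author's own statement) =====
-- stated objective: simpler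
-- what changed: Replaces the incremental running-set pass with a one-line sum that recomputes the distinct-character count of each prefix from scratch via set(s[:i+1]).
import Mathlib
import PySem

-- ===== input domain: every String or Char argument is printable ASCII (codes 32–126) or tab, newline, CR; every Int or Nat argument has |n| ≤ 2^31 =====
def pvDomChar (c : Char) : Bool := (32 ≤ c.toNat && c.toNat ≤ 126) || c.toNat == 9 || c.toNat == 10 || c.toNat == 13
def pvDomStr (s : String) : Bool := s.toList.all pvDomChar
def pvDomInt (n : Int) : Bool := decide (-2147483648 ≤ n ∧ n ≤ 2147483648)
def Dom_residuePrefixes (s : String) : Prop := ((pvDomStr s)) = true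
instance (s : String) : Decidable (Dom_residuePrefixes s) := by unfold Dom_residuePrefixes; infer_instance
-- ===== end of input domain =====

-- B replaces A's incremental running-set pass by recomputing each prefix's distinct-character
-- count from scratch (simpler one-liner; not faster).

-- ===== PORT A =====
-- running set + counter over range(len(s)); s[i] via pyGetD is exact since i is always in range
def residuePrefixes (s : String) : Int :=
  (((PySem.List.pyRange 0 (s.toList.length : Int) 1).foldl
    (fun (acc : PySem.Set Char × Int) (i : Int) =>
      let st := PySem.Set.add acc.1 (PySem.List.pyGetD s.toList i ' ')
      if PySem.Set.len st = PySem.Int.mod (i + 1) 3 then (st, acc.2 + 1) else (st, acc.2))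
    (PySem.Set.empty, 0))).2

-- ===== PORT B =====
-- sum(1 for i in range(len(s)) if len(set(s[:i+1])) == (i+1) % 3)
def residuePrefixes_alt (s : String) : Int :=
  (PySem.List.pyRange 0 (s.toList.length : Int) 1).foldl
    (fun (acc : Int) (i : Int) =>
      if PySem.Set.len (PySem.Set.ofList (PySem.List.slice s.toList none (some (i + 1))))
           = PySem.Int.mod (i + 1) 3
      then acc + 1 else acc) 0

-- ===== PRECONDITION & SPEC =====
def Spec_residuePrefixes (s : String) (out : Int) : Prop := out = residuePrefixes_alt s
instance (s : String) (out : Int) : Decidable (Spec_residuePrefixes s out) := by unfold Spec_residuePrefixes; infer_instance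

-- ===== CLAIM (what is proved, stated in full; the proofs are below) =====
def Claim_equal_residuePrefixes : Prop := ∀ (s : String), Dom_residuePrefixes s → Spec_residuePrefixes s (residuePrefixes s)

-- ===== LEMMAS AND PROOFS =====

-- joint invariant over the first n indices: A's running set is the dedup of the prefix,
-- and A's counter equals B's accumulator
theorem residuePrefixes_inv (l : List Char) (n : Nat) (hn : n ≤ l.length) :
    (PySem.List.pyRange 0 (n : Int) 1).foldl
      (fun (acc : PySem.Set Char × Int) (i : Int) =>
        let st := PySem.Set.add acc.1 (PySem.List.pyGetD l i ' ')
        if PySem.Set.len st = PySem.Int.mod (i + 1) 3 then (st, acc.2 + 1) else (st, acc.2))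
      (PySem.Set.empty, 0)
    = (PySem.Set.ofList (l.take n),
       (PySem.List.pyRange 0 (n : Int) 1).foldl
         (fun (acc : Int) (i : Int) =>
           if PySem.Set.len (PySem.Set.ofList (PySem.List.slice l none (some (i + 1))))
                = PySem.Int.mod (i + 1) 3
           then acc + 1 else acc) 0) := by
  induction n with
  | zero =>
      simp [PySem.List.pyRange_one_eq_nil, PySem.Set.ofList, PySem.Set.empty]
  | succ n ih =>
      have hn' : n ≤ l.length := Nat.le_of_succ_le hn
      have hlt : n < l.length := hn
      have hsplit : PySem.List.pyRange 0 ((n + 1 : Nat) : Int) 1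
          = PySem.List.pyRange 0 (n : Int) 1 ++ [(n : Int)] := by
        have : ((n + 1 : Nat) : Int) = (n : Int) + 1 := by push_cast; ring
        rw [this, PySem.List.pyRange_one_succ_right (by positivity)]
      rw [hsplit, List.foldl_append, List.foldl_append, ih hn']
      have hget : PySem.List.pyGetD l (n : Int) ' ' = l[n] := by
        simp [PySem.List.pyGetD_natCast, List.getElem?_eq_getElem hlt]
      have htake : l.take (n + 1) = l.take n ++ [l[n]] := by
        rw [List.take_add_one, List.getElem?_eq_getElem hlt]
        simp
      have hslice : PySem.List.slice l none (some ((n : Int) + 1)) = l.take (n + 1) := by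
        have : ((n : Int) + 1) = ((n + 1 : Nat) : Int) := by push_cast; ring
        rw [this, PySem.List.slice_to_natCast]
      have hadd : PySem.Set.add (PySem.Set.ofList (l.take n)) l[n]
          = PySem.Set.ofList (l.take (n + 1)) := by
        rw [htake, PySem.Set.ofList_eq_foldl, PySem.Set.ofList_eq_foldl, List.foldl_append]
        simp
      simp only [List.foldl_cons, List.foldl_nil, hget, hadd, hslice]
      split <;> rfl

-- ===== VERDICT (by name: the statement is the Claim_ definition above) =====
theorem residuePrefixes_spec : Claim_equal_residuePrefixes := by
  intro s _
  unfold Spec_residuePrefixes residuePrefixes residuePrefixes_alt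
  rw [residuePrefixes_inv s.toList s.toList.length le_rfl]
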